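-- pv_equiv track=rewrite | github.com/LauraLivers/mlops_sdv | historical_gap_filler.py | _is_home_advantage
-- ===== SOURCE A (Python) =====
-- def _is_home_advantage(home_team, away_team, location_country):
--     """
--     Determine if a match should be considered neutral or home advantage.
--     """
--
--     if home_team == location_country or away_team == location_country:
--         return False  # Not neutral - one team is playing in their home country
--
--     country_variations = {
--         'United States': ['USA', 'United States'],
--         'England': ['England', 'United Kingdom'],
--         'Wales': ['Wales', 'United Kingdom'],
--         'Scotland': ['Scotland', 'United Kingdom'],
--         'Northern Ireland': ['Northern Ireland', 'United Kingdom'],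
--         'China PR': ['China', 'China PR'],
--         'South Korea': ['Korea Republic', 'South Korea'],
--         'North Korea': ['Korea DPR', 'North Korea'],
--     }
--
--     for country, variations in country_variations.items():
--         if location_country in variations:
--             if home_team in variations or away_team in variations:
--                 return False
--
--     return True  # Neutral - neither team is from the host country
-- ===== SOURCE B (Python) =====
-- _VARIATION_GROUPS = [
--     ['USA', 'United States'],
--     ['England', 'United Kingdom'],
--     ['Wales', 'United Kingdom'],
--     ['Scotland', 'United Kingdom'],
--     ['Northern Ireland', 'United Kingdom'],
--     ['China', 'China PR'],
--     ['Korea Republic', 'South Korea'],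
--     ['Korea DPR', 'North Korea'],
-- ]
--
-- # Inverted index built once: each name maps to the union of all groups containing it.
-- _INDEX = {}
-- for _group in _VARIATION_GROUPS:
--     for _name in _group:
--         _INDEX[_name] = _INDEX.get(_name, set()) | set(_group)
--
--
-- def _is_home_advantage(home_team, away_team, location_country):
--     if home_team == location_country or away_team == location_country:
--         return False
--     group = _INDEX.get(location_country)
--     if group is not None and (home_team in group or away_team in group):
--         return False
--     return True
-- ===== Notes on version B (the rewrite author's own statement) =====
-- stated objective: simpler
-- what changed: Replaces the per-call 8-group scan with an inverted index (name -> union of all groups containing it) built once at module load, so the function body is a single dict lookup plus two membership tests.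
import Mathlib
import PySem

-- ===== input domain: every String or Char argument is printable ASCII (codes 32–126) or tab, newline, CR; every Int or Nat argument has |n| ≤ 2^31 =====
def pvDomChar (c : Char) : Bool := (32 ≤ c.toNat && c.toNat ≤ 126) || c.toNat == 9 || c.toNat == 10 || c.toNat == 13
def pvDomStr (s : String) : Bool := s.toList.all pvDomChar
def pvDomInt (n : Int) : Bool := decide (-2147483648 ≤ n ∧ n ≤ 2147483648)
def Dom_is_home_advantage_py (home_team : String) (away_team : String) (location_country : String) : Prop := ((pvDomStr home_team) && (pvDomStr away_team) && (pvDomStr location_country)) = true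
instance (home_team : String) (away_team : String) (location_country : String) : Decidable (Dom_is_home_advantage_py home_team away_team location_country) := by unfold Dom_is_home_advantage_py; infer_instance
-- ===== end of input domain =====

-- B replaces A's per-group scan with an inverted index (name → union of its groups) built once and a single keyed lookup; objective: simpler.

-- ===== PORT A =====
-- the country_variations dict, in insertion order
def pvAVariations : List (String × List String) :=
  [("United States", ["USA", "United States"]),
   ("England", ["England", "United Kingdom"]),
   ("Wales", ["Wales", "United Kingdom"]),
   ("Scotland", ["Scotland", "United Kingdom"]),
   ("Northern Ireland", ["Northern Ireland", "United Kingdom"]),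
   ("China PR", ["China", "China PR"]),
   ("South Korea", ["Korea Republic", "South Korea"]),
   ("North Korea", ["Korea DPR", "North Korea"])]

-- the for-loop with its early return
def pvALoop (home_team away_team location_country : String) : List (String × List String) → Bool
  | [] => true
  | (_, variations) :: rest =>
      if variations.contains location_country then
        if variations.contains home_team || variations.contains away_team then
          false
        else
          pvALoop home_team away_team location_country rest
      else
        pvALoop home_team away_team location_country rest

def is_home_advantage_py (home_team : String) (away_team : String) (location_country : String) : Bool :=
  if home_team == location_country || away_team == location_country then
    false
  else
    pvALoop home_team away_team location_country pvAVariations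

-- ===== PORT B =====
def pvBGroups : List (List String) :=
  [["USA", "United States"],
   ["England", "United Kingdom"],
   ["Wales", "United Kingdom"],
   ["Scotland", "United Kingdom"],
   ["Northern Ireland", "United Kingdom"],
   ["China", "China PR"],
   ["Korea Republic", "South Korea"],
   ["Korea DPR", "North Korea"]]

-- _INDEX built once: for each group, for each name, _INDEX[name] = _INDEX.get(name, set()) | set(group)
def pvBIndex : PySem.Dict String (PySem.Set String) :=
  pvBGroups.foldl
    (fun d group =>
      group.foldl
        (fun d name => d.insert name (PySem.Set.union (d.getD name PySem.Set.empty) (PySem.Set.ofList group)))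
        d)
    PySem.Dict.empty

def is_home_advantage_py_alt (home_team : String) (away_team : String) (location_country : String) : Bool :=
  if home_team == location_country || away_team == location_country then
    false
  else
    match pvBIndex.get? location_country with
    | none => true
    | some group =>
        if group.contains home_team || group.contains away_team then false else true

-- ===== PRECONDITION & SPEC =====
def Spec_is_home_advantage_py (home_team : String) (away_team : String) (location_country : String) (out : Bool) : Prop := out = is_home_advantage_py_alt home_team away_team location_country
instance (home_team : String) (away_team : String) (location_country : String) (out : Bool) : Decidable (Spec_is_home_advantage_py home_team away_team location_country out) := by unfold Spec_is_home_advantage_py; infer_instance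

-- ===== CLAIM (what is proved, stated in full; the proofs are below) =====
def Claim_equal_is_home_advantage_py : Prop := ∀ (home_team : String) (away_team : String) (location_country : String), Dom_is_home_advantage_py home_team away_team location_country → Spec_is_home_advantage_py home_team away_team location_country (is_home_advantage_py home_team away_team location_country)

-- ===== LEMMAS AND PROOFS =====
-- the value the module-level index loop computes, as a literal
def pvBIndexLit : PySem.Dict String (PySem.Set String) := PySem.Dict.mk
  [("USA", ["USA", "United States"]), ("United States", ["USA", "United States"]),
   ("England", ["England", "United Kingdom"]),
   ("United Kingdom", ["England", "United Kingdom", "Wales", "Scotland", "Northern Ireland"]),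
   ("Wales", ["Wales", "United Kingdom"]), ("Scotland", ["Scotland", "United Kingdom"]),
   ("Northern Ireland", ["Northern Ireland", "United Kingdom"]),
   ("China", ["China", "China PR"]), ("China PR", ["China", "China PR"]),
   ("Korea Republic", ["Korea Republic", "South Korea"]), ("South Korea", ["Korea Republic", "South Korea"]),
   ("Korea DPR", ["Korea DPR", "North Korea"]), ("North Korea", ["Korea DPR", "North Korea"])]

theorem pvBIndex_eq : pvBIndex = pvBIndexLit := by decide

theorem pv_main (home_team away_team location_country : String) :
    is_home_advantage_py home_team away_team location_country
      = is_home_advantage_py_alt home_team away_team location_country := by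
  unfold is_home_advantage_py is_home_advantage_py_alt
  cases hg : (home_team == location_country || away_team == location_country) with
  | true => simp
  | false =>
    simp only [Bool.false_eq_true, if_false]
    rw [pvBIndex_eq]
    by_cases h1 : location_country = "USA"
    · subst h1; rw [Bool.eq_iff_iff]
      simp [pvALoop, pvAVariations, pvBIndexLit, PySem.Dict.get?]; try tauto
    by_cases h2 : location_country = "United States"
    · subst h2; rw [Bool.eq_iff_iff]
      simp [pvALoop, pvAVariations, pvBIndexLit, PySem.Dict.get?]; try tauto
    by_cases h3 : location_country = "England"
    · subst h3; rw [Bool.eq_iff_iff]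
      simp [pvALoop, pvAVariations, pvBIndexLit, PySem.Dict.get?]; try tauto
    by_cases h4 : location_country = "United Kingdom"
    · subst h4; rw [Bool.eq_iff_iff]
      simp [pvALoop, pvAVariations, pvBIndexLit, PySem.Dict.get?]; try tauto
    by_cases h5 : location_country = "Wales"
    · subst h5; rw [Bool.eq_iff_iff]
      simp [pvALoop, pvAVariations, pvBIndexLit, PySem.Dict.get?]; try tauto
    by_cases h6 : location_country = "Scotland"
    · subst h6; rw [Bool.eq_iff_iff]
      simp [pvALoop, pvAVariations, pvBIndexLit, PySem.Dict.get?]; try tauto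
    by_cases h7 : location_country = "Northern Ireland"
    · subst h7; rw [Bool.eq_iff_iff]
      simp [pvALoop, pvAVariations, pvBIndexLit, PySem.Dict.get?]; try tauto
    by_cases h8 : location_country = "China"
    · subst h8; rw [Bool.eq_iff_iff]
      simp [pvALoop, pvAVariations, pvBIndexLit, PySem.Dict.get?]; try tauto
    by_cases h9 : location_country = "China PR"
    · subst h9; rw [Bool.eq_iff_iff]
      simp [pvALoop, pvAVariations, pvBIndexLit, PySem.Dict.get?]; try tauto
    by_cases h10 : location_country = "Korea Republic"
    · subst h10; rw [Bool.eq_iff_iff]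
      simp [pvALoop, pvAVariations, pvBIndexLit, PySem.Dict.get?]; try tauto
    by_cases h11 : location_country = "South Korea"
    · subst h11; rw [Bool.eq_iff_iff]
      simp [pvALoop, pvAVariations, pvBIndexLit, PySem.Dict.get?]; try tauto
    by_cases h12 : location_country = "Korea DPR"
    · subst h12; rw [Bool.eq_iff_iff]
      simp [pvALoop, pvAVariations, pvBIndexLit, PySem.Dict.get?]; try tauto
    by_cases h13 : location_country = "North Korea"
    · subst h13; rw [Bool.eq_iff_iff]
      simp [pvALoop, pvAVariations, pvBIndexLit, PySem.Dict.get?]; try tauto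
    simp [pvALoop, pvAVariations, pvBIndexLit, PySem.Dict.get?,
          h1, h2, h3, h4, h5, h6, h7, h8, h9, h10, h11, h12, h13,
          Ne.symm h1, Ne.symm h2, Ne.symm h3, Ne.symm h4, Ne.symm h5, Ne.symm h6, Ne.symm h7,
          Ne.symm h8, Ne.symm h9, Ne.symm h10, Ne.symm h11, Ne.symm h12, Ne.symm h13]

-- ===== VERDICT (by name: the statement is the Claim_ definition above) =====
theorem is_home_advantage_py_spec : Claim_equal_is_home_advantage_py := by
  intro h a l _
  exact pv_main h a l
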